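-- pv_equiv track=rewrite | github.com/kolesole/spam-filter | final_brute/EmailHelper.py | is_string_html
-- ===== SOURCE A (Python) =====
-- def is_string_html(string:str) -> bool:
--     common_html_tags = [
--     "<html", "<head", "<title",
--     "<body", "<h1", "<h2", "<h3", "<h4", "<h5", "<h6",
--     "<p", "<a", "<img",
--     "<ul", "<ol", "<li",
--     "<div", "<span",
--     "<table", "<tr", "<td", "<th",
--     "<br", "<hr",
--     "<form", "<input", "<button",
--     "<style", "<script"
--     ]
--     for tag in common_html_tags:
--         if tag in string or tag.upper() in string:
--             return True
--     return False
-- ===== SOURCE B (Python) =====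
-- # Single left-to-right scan: at each tag-opening bracket in the string, try to match one of the
-- # explicitly listed lowercase/UPPERCASE tag patterns at that position.
-- _HTML_PATTERNS = [
--     "<html", "<HTML", "<head", "<HEAD", "<title", "<TITLE", "<body", "<BODY",
--     "<h1", "<H1", "<h2", "<H2", "<h3", "<H3", "<h4", "<H4", "<h5", "<H5",
--     "<h6", "<H6", "<p", "<P", "<a", "<A", "<img", "<IMG", "<ul", "<UL",
--     "<ol", "<OL", "<li", "<LI", "<div", "<DIV", "<span", "<SPAN",
--     "<table", "<TABLE", "<tr", "<TR", "<td", "<TD", "<th", "<TH",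
--     "<br", "<BR", "<hr", "<HR", "<form", "<FORM", "<input", "<INPUT",
--     "<button", "<BUTTON", "<style", "<STYLE", "<script", "<SCRIPT",
-- ]
--
--
-- def is_string_html(string: str) -> bool:
--     return any(
--         c == "<" and any(string.startswith(p, i) for p in _HTML_PATTERNS)
--         for i, c in enumerate(string)
--     )
-- ===== Notes on version B (the rewrite author's own statement) =====
-- stated objective: alternative
-- what changed: Instead of running ~60 independent substring searches (one 'tag in string' scan per tag and per case variant), B makes a single left-to-right scan over the string and, only at positions holding the tag-opening bracket character, tries to match each pattern from one explicit lowercase/UPPERCASE pattern list with startswith.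
import Mathlib
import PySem

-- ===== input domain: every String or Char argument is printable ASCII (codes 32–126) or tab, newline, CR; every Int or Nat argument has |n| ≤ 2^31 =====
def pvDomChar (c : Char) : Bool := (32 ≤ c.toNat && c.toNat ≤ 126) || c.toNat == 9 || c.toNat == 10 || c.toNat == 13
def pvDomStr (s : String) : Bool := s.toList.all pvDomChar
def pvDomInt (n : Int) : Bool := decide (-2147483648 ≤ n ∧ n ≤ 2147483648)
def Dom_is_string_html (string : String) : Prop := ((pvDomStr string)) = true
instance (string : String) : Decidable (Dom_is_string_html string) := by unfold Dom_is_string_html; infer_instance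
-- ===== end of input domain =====

-- B replaces A's ~60 independent 'tag in string' substring searches by one left-to-right
-- scan that pattern-matches only at tag-opening-bracket positions against an explicit pattern list (alternative
-- structure, no speed claim).

-- ===== PORT A =====
def pvCommonHtmlTags : List String :=
  ["<html", "<head", "<title",
   "<body", "<h1", "<h2", "<h3", "<h4", "<h5", "<h6",
   "<p", "<a", "<img",
   "<ul", "<ol", "<li",
   "<div", "<span",
   "<table", "<tr", "<td", "<th",
   "<br", "<hr",
   "<form", "<input", "<button",
   "<style", "<script"]

-- A's for-loop with early 'return True' and final 'return False' is the List.any of its test.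
def is_string_html (string : String) : Bool :=
  pvCommonHtmlTags.any (fun tag =>
    PySem.Str.isIn tag string || PySem.Str.isIn (PySem.Str.upper tag) string)

-- ===== PORT B =====
def pvHtmlPatterns : List String :=
  ["<html", "<HTML", "<head", "<HEAD", "<title", "<TITLE", "<body", "<BODY",
   "<h1", "<H1", "<h2", "<H2", "<h3", "<H3", "<h4", "<H4", "<h5", "<H5",
   "<h6", "<H6", "<p", "<P", "<a", "<A", "<img", "<IMG", "<ul", "<UL",
   "<ol", "<OL", "<li", "<LI", "<div", "<DIV", "<span", "<SPAN",
   "<table", "<TABLE", "<tr", "<TR", "<td", "<TD", "<th", "<TH",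
   "<br", "<BR", "<hr", "<HR", "<form", "<FORM", "<input", "<INPUT",
   "<button", "<BUTTON", "<style", "<STYLE", "<script", "<SCRIPT"]

-- 'string.startswith(p, i)' with 0 ≤ i (enumerate indices) is exactly the prefix test on the
-- character list dropped at i.
def is_string_html_alt (string : String) : Bool :=
  (PySem.List.enumerate string.toList).any (fun ic =>
    ic.2 == '<' && pvHtmlPatterns.any (fun p =>
      PySem.Chars.startswith (string.toList.drop ic.1.toNat) p.toList))

-- ===== PRECONDITION & SPEC =====
def Spec_is_string_html (string : String) (out : Bool) : Prop := out = is_string_html_alt string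
instance (string : String) (out : Bool) : Decidable (Spec_is_string_html string out) := by unfold Spec_is_string_html; infer_instance

-- ===== CLAIM (what is proved, stated in full; the proofs are below) =====
def Claim_equal_is_string_html : Prop := ∀ (string : String), Dom_is_string_html string → Spec_is_string_html string (is_string_html string)

-- ===== LEMMAS AND PROOFS =====

-- A's fused test 'f t || f (upper t)' over a list is the plain any of f over the doubled list.
theorem pv_any_or_upper (f : String → Bool) (l : List String) :
    l.any (fun t => f t || f (PySem.Str.upper t))
      = (l.flatMap (fun t => [t, PySem.Str.upper t])).any f := by
  induction l with
  | nil => rfl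
  | cons t rest ih =>
    simp only [List.flatMap_cons, List.any_append, List.any_cons, List.any_nil, ih]
    simp [Bool.or_assoc]

set_option maxRecDepth 8192 in
theorem pv_pats_eq :
    pvCommonHtmlTags.flatMap (fun t => [t, PySem.Str.upper t]) = pvHtmlPatterns := by decide

set_option maxRecDepth 8192 in
theorem pv_pats_head : ∀ p ∈ pvHtmlPatterns, p.toList.head? = some '<' := by decide

-- a nonempty pattern is an infix iff it is a prefix at some in-range offset
theorem pv_infix_iff_exists_drop (p l : List Char) (hp : p ≠ []) :
    p <:+: l ↔ ∃ i, i < l.length ∧ p <+: l.drop i := by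
  constructor
  · intro h
    obtain ⟨t, hpt, q, rfl⟩ := List.infix_iff_prefix_suffix.mp h
    refine ⟨q.length, ?_, ?_⟩
    · have hlen : 0 < t.length := by
        cases t with
        | nil => exact absurd (List.prefix_nil.mp hpt) hp
        | cons a r => simp
      simp only [List.length_append]
      omega
    · simpa [List.drop_left] using hpt
  · rintro ⟨i, _, hpre⟩
    exact List.infix_iff_prefix_suffix.mpr ⟨l.drop i, hpre, List.drop_suffix i l⟩

theorem pv_head_of_prefix_drop (p l : List Char) (i : Nat) (hi : i < l.length)
    (hh : p.head? = some '<') (hpre : p <+: l.drop i) : l[i] = '<' := by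
  obtain ⟨r, hr⟩ := hpre
  have h1 : (l.drop i).head? = some '<' := by
    cases p with
    | nil => simp at hh
    | cons a q => simp at hh; simp [← hr, hh]
  rw [List.head?_drop] at h1
  have := List.getElem?_eq_getElem hi
  rw [this] at h1
  exact Option.some.injEq _ _ ▸ (by simpa using h1)

theorem pv_main (s : String) : is_string_html s = is_string_html_alt s := by
  rw [is_string_html, pv_any_or_upper, pv_pats_eq]
  rw [Bool.eq_iff_iff]
  constructor
  · intro h
    obtain ⟨p, hp, hin⟩ := List.any_eq_true.mp h
    have hhead := pv_pats_head p hp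
    have hne : p.toList ≠ [] := by intro h0; rw [h0] at hhead; simp at hhead
    have hinf : p.toList <:+: s.toList := (PySem.Str.isIn_iff_infix _ _).mp hin
    obtain ⟨i, hi, hpre⟩ := (pv_infix_iff_exists_drop _ _ hne).mp hinf
    rw [is_string_html_alt]
    refine List.any_eq_true.mpr ⟨((0 : Int) + i, s.toList[i]), ?_, ?_⟩
    · exact (PySem.List.mem_enumerate_iff _ _ _).mpr ⟨i, hi, rfl⟩
    · have hc : s.toList[i] = '<' := pv_head_of_prefix_drop _ _ i hi hhead hpre
      have hto : ((0 : Int) + (i : Int)).toNat = i := by omega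
      rw [Bool.and_eq_true]
      refine ⟨by simp [hc], ?_⟩
      refine List.any_eq_true.mpr ⟨p, hp, ?_⟩
      rw [hto, PySem.Chars.startswith_iff]
      exact hpre
  · intro h
    rw [is_string_html_alt] at h
    obtain ⟨ic, hmem, hic⟩ := List.any_eq_true.mp h
    obtain ⟨k, hk, rfl⟩ := (PySem.List.mem_enumerate_iff _ _ _).mp hmem
    rw [Bool.and_eq_true] at hic
    obtain ⟨-, h2⟩ := hic
    obtain ⟨p, hp, hsw⟩ := List.any_eq_true.mp h2
    have hto : ((0 : Int) + (k : Int)).toNat = k := by omega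
    rw [hto, PySem.Chars.startswith_iff] at hsw
    have hhead := pv_pats_head p hp
    have hne : p.toList ≠ [] := by intro h0; rw [h0] at hhead; simp at hhead
    refine List.any_eq_true.mpr ⟨p, hp, ?_⟩
    exact (PySem.Str.isIn_iff_infix _ _).mpr
      ((pv_infix_iff_exists_drop _ _ hne).mpr ⟨k, hk, hsw⟩)

-- ===== VERDICT (by name: the statement is the Claim_ definition above) =====
theorem is_string_html_spec : Claim_equal_is_string_html := by
  intro s _
  unfold Spec_is_string_html
  exact pv_main s
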